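-- pv_equiv track=rewrite | github.com/oneQuiz/oneCrypto | oneCrypto/common.py | isCoprime
-- ===== SOURCE A (Python) =====
-- def isCoprime(pls: list):
--     d = gcd(pls[0], pls[1])
--     for i in range(2, len(pls)):
--         d = gcd(d, pls[i])
--     if d == 1:
--         return True
--     else:
--         return False
--
-- def gcd(a, b):
--     if b == 0:
--         return a
--     elif a == 0:
--         return b
--     else:
--         return gcd(b, a % b)
-- ===== SOURCE B (Python) =====
-- def _gcd(a, b):
--     # iterative Euclid; identical values to the recursive one (0 % b == 0)
--     while b:
--         a, b = b, a % b
--     return a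
--
-- def isCoprime(pls: list):
--     d = 0
--     for x in pls:
--         d = _gcd(d, x)
--     return d == 1
-- ===== Notes on version B (the rewrite author's own statement) =====
-- stated objective: simpler
-- what changed: Recursive gcd with a special a==0 branch becomes a plain iterative while-loop Euclid, and the index-based range(2,len) loop with a separate seeding call becomes a single left fold of gcd over the whole list starting from 0 (gcd(0,x)=x).
import Mathlib
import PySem

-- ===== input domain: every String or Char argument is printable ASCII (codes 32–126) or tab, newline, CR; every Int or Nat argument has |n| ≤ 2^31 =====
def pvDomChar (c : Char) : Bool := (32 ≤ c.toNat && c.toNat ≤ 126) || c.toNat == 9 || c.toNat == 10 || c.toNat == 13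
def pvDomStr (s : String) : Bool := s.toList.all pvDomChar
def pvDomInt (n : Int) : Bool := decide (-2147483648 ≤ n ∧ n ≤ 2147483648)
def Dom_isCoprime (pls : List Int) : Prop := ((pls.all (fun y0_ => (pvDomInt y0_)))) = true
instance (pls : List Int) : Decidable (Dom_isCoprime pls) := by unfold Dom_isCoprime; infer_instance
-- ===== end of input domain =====

-- B keeps the same Euclid recurrence but as an iterative loop and one fold over the whole
-- list seeded with 0 (simpler decomposition); return-value equivalence on lists of length ≥ 2.

-- termination fact for Euclid's recurrence under Python's (floor) modulo
theorem pvModAbsLt (a b : Int) (hb : b ≠ 0) :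
    (PySem.Int.mod a b).natAbs < b.natAbs := by
  rcases lt_trichotomy b 0 with h | h | h
  · have := PySem.Int.mod_neg_bounds a h
    omega
  · exact absurd h hb
  · have h1 := PySem.Int.mod_nonneg a h
    have h2 := PySem.Int.mod_lt a h
    omega

-- ===== PORT A =====
def gcdA (a b : Int) : Int :=
  if hb : b = 0 then a
  else if a = 0 then b
  else gcdA b (PySem.Int.mod a b)
termination_by b.natAbs
decreasing_by exact pvModAbsLt a b hb

def isCoprime (pls : List Int) : Bool :=
  let d := gcdA (PySem.List.pyGetD pls 0 0) (PySem.List.pyGetD pls 1 0)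
  let d := (PySem.List.pyRange 2 (PySem.List.len pls) 1).foldl
    (fun d i => gcdA d (PySem.List.pyGetD pls i 0)) d
  if d = 1 then true else false

-- ===== PORT B =====
-- iterative `while b: a, b = b, a % b` as its tail recursion
def gcdB (a b : Int) : Int :=
  if hb : b = 0 then a
  else gcdB b (PySem.Int.mod a b)
termination_by b.natAbs
decreasing_by exact pvModAbsLt a b hb

def isCoprime_alt (pls : List Int) : Bool :=
  decide (pls.foldl (fun d x => gcdB d x) 0 = 1)

-- ===== PRECONDITION & SPEC =====
-- Pre_ excludes exactly the lists of length < 2, on which A raises IndexError.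
def Pre_isCoprime (pls : List Int) : Prop := 2 ≤ pls.length
instance (pls : List Int) : Decidable (Pre_isCoprime pls) := by unfold Pre_isCoprime; infer_instance

def pvWitness_isCoprime : List Int := [6, 10, 15]

def Spec_isCoprime (pls : List Int) (out : Bool) : Prop := out = isCoprime_alt pls
instance (pls : List Int) (out : Bool) : Decidable (Spec_isCoprime pls out) := by unfold Spec_isCoprime; infer_instance

-- ===== CLAIM (what is proved, stated in full; the proofs are below) =====
def Claim_equal_isCoprime : Prop := ∀ (pls : List Int), Dom_isCoprime pls → Pre_isCoprime pls → Spec_isCoprime pls (isCoprime pls)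

-- ===== LEMMAS AND PROOFS =====

theorem gcdB_zero_left (b : Int) : gcdB 0 b = b := by
  rw [gcdB]
  split
  · omega
  · rw [show PySem.Int.mod 0 b = 0 by simp [PySem.Int.mod], gcdB]
    simp

theorem gcdA_eq_gcdB (a b : Int) : gcdA a b = gcdB a b := by
  rw [gcdA, gcdB]
  split
  · rfl
  · split
    · subst a
      rw [show PySem.Int.mod (0:Int) b = 0 by simp [PySem.Int.mod], gcdB]
      simp
    · exact gcdA_eq_gcdB b (PySem.Int.mod a b)
termination_by b.natAbs
decreasing_by exact pvModAbsLt a b (by assumption)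

theorem isCoprime_spec : Claim_equal_isCoprime := by
  intro pls _ hpre
  unfold Pre_isCoprime at hpre
  match pls, hpre with
  | p0 :: p1 :: rest, _ =>
    show Spec_isCoprime _ _
    simp only [Spec_isCoprime, isCoprime, isCoprime_alt]
    rw [PySem.List.foldl_pyRange_pyGetD (p0 :: p1 :: rest) 0
        (fun d x => gcdA d x) _ (by omega : (0:Int) ≤ 2)]
    have hfold : ∀ (l : List Int) (d : Int),
        l.foldl (fun d x => gcdA d x) d = l.foldl (fun d x => gcdB d x) d := by
      intro l
      induction l with
      | nil => intro d; rfl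
      | cons x xs ih => intro d; simp only [List.foldl, gcdA_eq_gcdB]
    simp only [PySem.List.pyGetD, gcdA_eq_gcdB,
      List.foldl_cons, gcdB_zero_left]
    norm_num
    simp only [show (2:Int).toNat = 2 from rfl, List.drop_succ_cons, List.drop_zero]
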